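-- pv_equiv track=rewrite | github.com/tomasvanagas/prime-research | experiments/circuit_complexity/lucy_dp_structure.py | get_floor_values
-- ===== SOURCE A (Python) =====
-- def get_floor_values(x):
--     """Get all distinct values of floor(x/k) for k = 1, ..., x."""
--     vals = set()
--     k = 1
--     while k * k <= x:
--         vals.add(x // k)
--         vals.add(k)
--         k += 1
--     return sorted(vals)
-- ===== SOURCE B (Python) =====
-- def get_floor_values(x):
--     """Get all distinct values of floor(x/k) for k = 1, ..., x."""
--     result = []
--     k = 1
--     while k <= x:
--         q = x // k
--         result.append(q)
--         k = x // q + 1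
--     return sorted(result)
-- ===== Notes on version B (the rewrite author's own statement) =====
-- stated objective: faster
-- what changed: Replaces the k+=1 sqrt-bounded loop with a symmetric double set-insert by a divisor-block (hyperbola) enumeration that jumps k to x // (x // k) + 1, visiting each distinct quotient exactly once with no set needed.
import Mathlib
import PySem

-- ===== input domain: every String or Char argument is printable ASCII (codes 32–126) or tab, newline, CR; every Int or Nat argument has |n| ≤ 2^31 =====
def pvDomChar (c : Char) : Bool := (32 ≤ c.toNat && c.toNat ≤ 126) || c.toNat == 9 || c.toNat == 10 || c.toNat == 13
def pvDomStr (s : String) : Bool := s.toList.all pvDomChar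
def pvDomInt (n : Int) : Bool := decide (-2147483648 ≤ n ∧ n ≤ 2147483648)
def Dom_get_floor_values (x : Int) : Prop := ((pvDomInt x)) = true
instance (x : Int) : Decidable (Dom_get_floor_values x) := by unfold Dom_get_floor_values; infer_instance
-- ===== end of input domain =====

-- B replaces A's k+=1 sqrt-bounded loop with symmetric set inserts by a divisor-block (hyperbola)
-- enumeration that jumps k to x // (x // k) + 1, visiting each distinct quotient exactly once with no set.


-- ===== PORT A =====
-- the while loop: k from 1 while k*k <= x, vals.add(x//k); vals.add(k)
def aLoop (x k : Int) (vals : PySem.Set Int) : PySem.Set Int :=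
  if k * k ≤ x then
    aLoop x (k + 1) (PySem.Set.add (PySem.Set.add vals (PySem.Int.floordiv x k)) k)
  else vals
termination_by (x + 1 - k).toNat
decreasing_by
  have hk : k ≤ x := by nlinarith
  omega

def get_floor_values (x : Int) : List Int :=
  PySem.List.sorted (aLoop x 1 PySem.Set.empty) (fun v => v) false

-- ===== PORT B =====
-- the while loop: k from 1 while k <= x, append q = x//k, then k = x//q + 1.
-- The extra '1 ≤ k' conjunct is a totality guard only: k starts at 1 and only increases.
def bLoop (x k : Int) (result : List Int) : List Int :=
  if h : 1 ≤ k ∧ k ≤ x then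
    bLoop x (PySem.Int.floordiv x (PySem.Int.floordiv x k) + 1)
      (result ++ [PySem.Int.floordiv x k])
  else result
termination_by (x + 1 - k).toNat
decreasing_by
  obtain ⟨h1, h2⟩ := h
  have hq : 1 ≤ PySem.Int.floordiv x k := by
    rw [PySem.Int.le_floordiv_iff_mul_le (by omega)]; omega
  have hmul : (PySem.Int.floordiv x k) * k ≤ x :=
    (PySem.Int.le_floordiv_iff_mul_le (by omega)).mp le_rfl
  have hk' : k ≤ PySem.Int.floordiv x (PySem.Int.floordiv x k) := by
    rw [PySem.Int.le_floordiv_iff_mul_le (by omega)]; nlinarith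
  omega

def get_floor_values_alt (x : Int) : List Int :=
  PySem.List.sorted (bLoop x 1 []) (fun v => v) false

-- ===== PRECONDITION & SPEC =====
def Spec_get_floor_values (x : Int) (out : List Int) : Prop := out = get_floor_values_alt x
instance (x : Int) (out : List Int) : Decidable (Spec_get_floor_values x out) := by unfold Spec_get_floor_values; infer_instance

-- ===== CLAIM (what is proved, stated in full; the proofs are below) =====
def Claim_equal_get_floor_values : Prop := ∀ (x : Int), Dom_get_floor_values x → Spec_get_floor_values x (get_floor_values x)

-- ===== LEMMAS AND PROOFS =====

theorem fd_pos {x k : Int} (h1 : 0 < k) (h2 : k ≤ x) : 1 ≤ PySem.Int.floordiv x k := by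
  rw [PySem.Int.le_floordiv_iff_mul_le h1]; omega

theorem fd_mul_le {x k : Int} (h1 : 0 < k) : (PySem.Int.floordiv x k) * k ≤ x :=
  (PySem.Int.le_floordiv_iff_mul_le h1).mp le_rfl

theorem lt_fd_succ_mul {x k : Int} (h1 : 0 < k) : x < (PySem.Int.floordiv x k + 1) * k :=
  (PySem.Int.floordiv_lt_iff_lt_mul h1).mp (lt_add_one _)

-- within one "block" [k, x // (x // k)] the quotient is constant
theorem fd_block {x k j : Int} (h1 : 0 < k) (h2 : k ≤ x) (h3 : k ≤ j)
    (h4 : j ≤ PySem.Int.floordiv x (PySem.Int.floordiv x k)) :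
    PySem.Int.floordiv x j = PySem.Int.floordiv x k := by
  have hqpos : 1 ≤ PySem.Int.floordiv x k := fd_pos h1 h2
  have hjpos : 0 < j := by omega
  have hjq : j * PySem.Int.floordiv x k ≤ x :=
    (PySem.Int.le_floordiv_iff_mul_le (by omega)).mp h4
  have hge : PySem.Int.floordiv x k ≤ PySem.Int.floordiv x j := by
    rw [PySem.Int.le_floordiv_iff_mul_le hjpos]; nlinarith
  have hstep : x < (PySem.Int.floordiv x k + 1) * k := lt_fd_succ_mul h1
  have hle : PySem.Int.floordiv x j < PySem.Int.floordiv x k + 1 := by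
    rw [PySem.Int.floordiv_lt_iff_lt_mul hjpos]; nlinarith
  omega

theorem aLoop_stop {x k : Int} (h : ¬ k * k ≤ x) (hk : 1 ≤ k) (s : PySem.Set Int) (m : Int) :
    m ∈ aLoop x k s ↔
      m ∈ s ∨ ∃ j, k ≤ j ∧ j * j ≤ x ∧ (m = PySem.Int.floordiv x j ∨ m = j) := by
  rw [aLoop, if_neg h]
  constructor
  · exact Or.inl
  · rintro (hm | ⟨j, hj1, hj2, hj3⟩)
    · exact hm
    · exfalso; nlinarith

theorem aLoop_mem_aux (x : Int) (n : Nat) : ∀ (k : Int), (x + 1 - k).toNat ≤ n → 1 ≤ k →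
    ∀ (s : PySem.Set Int) (m : Int),
    m ∈ aLoop x k s ↔
      m ∈ s ∨ ∃ j, k ≤ j ∧ j * j ≤ x ∧ (m = PySem.Int.floordiv x j ∨ m = j) := by
  induction n with
  | zero =>
    intro k hn hk s m
    refine aLoop_stop (fun h => ?_) hk s m
    have : k ≤ x := by nlinarith
    omega
  | succ n ih =>
    intro k hn hk s m
    by_cases h : k * k ≤ x
    · have hkx : k ≤ x := by nlinarith
      rw [aLoop, if_pos h, ih (k + 1) (by omega) (by omega)]
      simp only [PySem.Set.mem_add]
      constructor
      · rintro (((hm | hm) | hm) | ⟨j, hj1, hj2, hj3⟩)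
        · exact Or.inl hm
        · exact Or.inr ⟨k, le_rfl, h, Or.inl hm⟩
        · exact Or.inr ⟨k, le_rfl, h, Or.inr hm⟩
        · exact Or.inr ⟨j, by omega, hj2, hj3⟩
      · rintro (hm | ⟨j, hj1, hj2, hj3⟩)
        · exact Or.inl (Or.inl (Or.inl hm))
        · rcases eq_or_lt_of_le hj1 with heq | hlt
          · subst heq
            rcases hj3 with rfl | rfl
            · exact Or.inl (Or.inl (Or.inr rfl))
            · exact Or.inl (Or.inr rfl)
          · exact Or.inr ⟨j, by omega, hj2, hj3⟩
    · exact aLoop_stop h hk s m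

theorem aLoop_mem (x k : Int) (hk : 1 ≤ k) (s : PySem.Set Int) (m : Int) :
    m ∈ aLoop x k s ↔
      m ∈ s ∨ ∃ j, k ≤ j ∧ j * j ≤ x ∧ (m = PySem.Int.floordiv x j ∨ m = j) :=
  aLoop_mem_aux x (x + 1 - k).toNat k le_rfl hk s m

theorem aLoop_nodup_aux (x : Int) (n : Nat) : ∀ (k : Int), (x + 1 - k).toNat ≤ n →
    ∀ (s : PySem.Set Int), s.Nodup → (aLoop x k s).Nodup := by
  induction n with
  | zero =>
    intro k hn s hs
    rw [aLoop]
    by_cases h : k * k ≤ x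
    · exfalso
      have : k ≤ x := by nlinarith
      omega
    · rw [if_neg h]; exact hs
  | succ n ih =>
    intro k hn s hs
    by_cases h : k * k ≤ x
    · have hkx : k ≤ x := by nlinarith
      rw [aLoop, if_pos h]
      exact ih (k + 1) (by omega) _ (PySem.Set.nodup_add _ _ (PySem.Set.nodup_add _ _ hs))
    · rw [aLoop, if_neg h]; exact hs

theorem aLoop_nodup (x k : Int) (s : PySem.Set Int) (hs : s.Nodup) : (aLoop x k s).Nodup :=
  aLoop_nodup_aux x (x + 1 - k).toNat k le_rfl s hs

-- the facts about one step of B's loop, derived from 1 <= k <= x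
theorem bStep {x k : Int} (hk : 1 ≤ k) (h : k ≤ x) :
    1 ≤ PySem.Int.floordiv x k ∧ (PySem.Int.floordiv x k) * k ≤ x ∧
      k + 1 ≤ PySem.Int.floordiv x (PySem.Int.floordiv x k) + 1 := by
  have hq : 1 ≤ PySem.Int.floordiv x k := fd_pos (by omega) h
  have hmul : (PySem.Int.floordiv x k) * k ≤ x := fd_mul_le (by omega)
  have : k ≤ PySem.Int.floordiv x (PySem.Int.floordiv x k) := by
    rw [PySem.Int.le_floordiv_iff_mul_le (by omega)]; nlinarith
  exact ⟨hq, hmul, by omega⟩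

theorem bLoop_acc_aux (x : Int) (n : Nat) : ∀ (k : Int), (x + 1 - k).toNat ≤ n →
    ∀ (acc : List Int), bLoop x k acc = acc ++ bLoop x k [] := by
  induction n with
  | zero =>
    intro k hn acc
    conv_lhs => rw [bLoop]
    conv_rhs => rw [bLoop]
    rw [dif_neg (by omega), dif_neg (by omega)]
    simp
  | succ n ih =>
    intro k hn acc
    by_cases h : 1 ≤ k ∧ k ≤ x
    · conv_lhs => rw [bLoop]
      conv_rhs => rw [bLoop]
      rw [dif_pos h, dif_pos h]
      obtain ⟨hq, hmul, hkk'⟩ := bStep h.1 h.2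
      rw [ih (PySem.Int.floordiv x (PySem.Int.floordiv x k) + 1) (by omega) (acc ++ [PySem.Int.floordiv x k]),
          ih (PySem.Int.floordiv x (PySem.Int.floordiv x k) + 1) (by omega) ([] ++ [PySem.Int.floordiv x k])]
      simp
    · conv_lhs => rw [bLoop]
      conv_rhs => rw [bLoop]
      rw [dif_neg h, dif_neg h]
      simp

theorem bLoop_acc (x k : Int) (acc : List Int) : bLoop x k acc = acc ++ bLoop x k [] :=
  bLoop_acc_aux x (x + 1 - k).toNat k le_rfl acc

theorem bLoop_mem_aux (x : Int) (n : Nat) : ∀ (k : Int), (x + 1 - k).toNat ≤ n → 1 ≤ k →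
    ∀ (m : Int), m ∈ bLoop x k [] ↔ ∃ j, k ≤ j ∧ j ≤ x ∧ m = PySem.Int.floordiv x j := by
  induction n with
  | zero =>
    intro k hn hk m
    rw [bLoop, dif_neg (by omega)]
    constructor
    · intro hm; simp at hm
    · rintro ⟨j, hj1, hj2, _⟩; omega
  | succ n ih =>
    intro k hn hk m
    by_cases h : k ≤ x
    · obtain ⟨hq, hmul, hkk'⟩ := bStep hk h
      rw [bLoop, dif_pos ⟨hk, h⟩, bLoop_acc]
      have IH := ih (PySem.Int.floordiv x (PySem.Int.floordiv x k) + 1) (by omega) (by omega) m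
      constructor
      · intro hm
        rcases List.mem_append.mp hm with hm | hm
        · exact ⟨k, le_rfl, h, by simpa using hm⟩
        · obtain ⟨j, hj1, hj2, hj3⟩ := IH.mp hm
          exact ⟨j, by omega, hj2, hj3⟩
      · rintro ⟨j, hj1, hj2, hj3⟩
        by_cases hjk : PySem.Int.floordiv x (PySem.Int.floordiv x k) + 1 ≤ j
        · exact List.mem_append.mpr (Or.inr (IH.mpr ⟨j, hjk, hj2, hj3⟩))
        · refine List.mem_append.mpr (Or.inl ?_)
          have hbl : PySem.Int.floordiv x j = PySem.Int.floordiv x k :=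
            fd_block (by omega) h hj1 (by omega)
          simp [hj3, hbl]
    · rw [bLoop, dif_neg (by omega)]
      constructor
      · intro hm; simp at hm
      · rintro ⟨j, hj1, hj2, _⟩; omega

theorem bLoop_mem (x k : Int) (hk : 1 ≤ k) (m : Int) :
    m ∈ bLoop x k [] ↔ ∃ j, k ≤ j ∧ j ≤ x ∧ m = PySem.Int.floordiv x j :=
  bLoop_mem_aux x (x + 1 - k).toNat k le_rfl hk m

theorem bLoop_pairwise_aux (x : Int) (n : Nat) : ∀ (k : Int), (x + 1 - k).toNat ≤ n → 1 ≤ k →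
    (bLoop x k []).Pairwise (· > ·) := by
  induction n with
  | zero =>
    intro k hn hk
    rw [bLoop, dif_neg (by omega)]
    exact List.Pairwise.nil
  | succ n ih =>
    intro k hn hk
    by_cases h : k ≤ x
    · obtain ⟨hq, hmul, hkk'⟩ := bStep hk h
      rw [bLoop, dif_pos ⟨hk, h⟩, bLoop_acc]
      simp only [List.nil_append, List.singleton_append]
      refine List.Pairwise.cons ?_ (ih (PySem.Int.floordiv x (PySem.Int.floordiv x k) + 1) (by omega) (by omega))
      intro m hm
      obtain ⟨j, hj1, hj2, rfl⟩ :=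
        (bLoop_mem x (PySem.Int.floordiv x (PySem.Int.floordiv x k) + 1) (by omega) m).mp hm
      have hjpos : 0 < j := by omega
      have hstep : x < (PySem.Int.floordiv x (PySem.Int.floordiv x k) + 1) * (PySem.Int.floordiv x k) :=
        lt_fd_succ_mul (by omega)
      exact (PySem.Int.floordiv_lt_iff_lt_mul hjpos).mpr (by nlinarith)
    · rw [bLoop, dif_neg (by omega)]
      exact List.Pairwise.nil

theorem bLoop_pairwise (x k : Int) (hk : 1 ≤ k) : (bLoop x k []).Pairwise (· > ·) :=
  bLoop_pairwise_aux x (x + 1 - k).toNat k le_rfl hk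

-- ===== VERDICT (by name: the statement is the Claim_ definition above) =====
theorem get_floor_values_spec : Claim_equal_get_floor_values := by
  intro x _
  unfold Spec_get_floor_values get_floor_values get_floor_values_alt
  apply PySem.List.sorted_eq_sorted_of_perm _ _ _ (fun a b hab => hab)
  rw [List.perm_ext_iff_of_nodup (aLoop_nodup x 1 PySem.Set.empty List.Pairwise.nil)
    (List.Pairwise.imp (fun hab => ne_of_gt hab) (bLoop_pairwise x 1 le_rfl))]
  intro m
  rw [aLoop_mem x 1 le_rfl, bLoop_mem x 1 le_rfl]
  constructor
  · rintro (h0 | ⟨j, hj1, hj2, hj3⟩)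
    · exact absurd h0 (List.not_mem_nil)
    · have hjpos : (0:Int) < j := by omega
      have hjx : j ≤ x := by nlinarith
      rcases hj3 with rfl | rfl
      · exact ⟨j, hj1, hjx, rfl⟩
      · refine ⟨PySem.Int.floordiv x m, fd_pos hjpos hjx, ?_, ?_⟩
        · have h1 := fd_mul_le (x := x) hjpos
          have h2 := fd_pos hjpos hjx
          nlinarith
        · have hq1 := fd_pos hjpos hjx
          have h1 := fd_mul_le (x := x) hjpos
          have h2 := lt_fd_succ_mul (x := x) hjpos
          have hle : m ≤ PySem.Int.floordiv x m := by
            rw [PySem.Int.le_floordiv_iff_mul_le hjpos]; exact hj2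
          have hA : m ≤ PySem.Int.floordiv x (PySem.Int.floordiv x m) := by
            rw [PySem.Int.le_floordiv_iff_mul_le (by omega)]; nlinarith
          have hB : PySem.Int.floordiv x (PySem.Int.floordiv x m) < m + 1 := by
            rw [PySem.Int.floordiv_lt_iff_lt_mul (by omega)]; nlinarith
          omega
  · rintro ⟨j, hj1, hj2, rfl⟩
    right
    by_cases hsq : j * j ≤ x
    · exact ⟨j, hj1, hsq, Or.inl rfl⟩
    · have hjpos : (0:Int) < j := by omega
      have hq1 : 1 ≤ PySem.Int.floordiv x j := fd_pos hjpos hj2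
      have hlt : PySem.Int.floordiv x j < j := by
        rw [PySem.Int.floordiv_lt_iff_lt_mul hjpos]; nlinarith
      have hmul : (PySem.Int.floordiv x j) * j ≤ x := fd_mul_le hjpos
      exact ⟨PySem.Int.floordiv x j, hq1, by nlinarith, Or.inr rfl⟩
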